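-- pv_equiv track=rewrite | github.com/Wirusiux/Uzduotis1 | main.py | tryTheCandidate
-- ===== SOURCE A (Python) =====
-- def tryTheCandidate(bucketToEmpty, candidateWord, lettersLeft):
--     #nezinom ar kandidatas tinka, pasikuriam temp kintamuosius
--     newBucket = bucketToEmpty.copy()
--     tempLettersLeft = lettersLeft
--     isGoodWord = True
--     #begam per kandidato raides ir tustimam "bucket", jei nepavyksta istustinti, abort:
--     for letter in candidateWord.keys():
--         if (newBucket[letter] - candidateWord[letter] >= 0):
--             newBucket[letter] = newBucket[letter] - candidateWord[letter]
--             tempLettersLeft -= candidateWord[letter]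
--         else:
--             isGoodWord = False
--             break
--     if (isGoodWord):
--         return (True, newBucket, tempLettersLeft)
--     return (False, bucketToEmpty, lettersLeft)
--
--     return  (newBucket, lettersLeft)
-- ===== SOURCE B (Python) =====
-- def tryTheCandidate(bucketToEmpty, candidateWord, lettersLeft):
--     # validate first (short-circuits exactly where A's loop stops), then build
--     if all(bucketToEmpty[letter] >= candidateWord[letter] for letter in candidateWord):
--         cost = sum(candidateWord.values())
--         newBucket = bucketToEmpty.copy()
--         for letter in candidateWord:
--             newBucket[letter] -= candidateWord[letter]
--         return (True, newBucket, lettersLeft - cost)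
--     return (False, bucketToEmpty, lettersLeft)
-- ===== Notes on version B (the rewrite author's own statement) =====
-- stated objective: simpler
-- what changed: B separates feasibility from mutation: one all() pass validates every letter against the original bucket, then a plain subtraction loop builds the new bucket and the new letters-left is the closed form lettersLeft - sum(candidateWord.values()), instead of A's single break-out loop threading a partially-updated bucket and an accumulator.
import Mathlib
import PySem

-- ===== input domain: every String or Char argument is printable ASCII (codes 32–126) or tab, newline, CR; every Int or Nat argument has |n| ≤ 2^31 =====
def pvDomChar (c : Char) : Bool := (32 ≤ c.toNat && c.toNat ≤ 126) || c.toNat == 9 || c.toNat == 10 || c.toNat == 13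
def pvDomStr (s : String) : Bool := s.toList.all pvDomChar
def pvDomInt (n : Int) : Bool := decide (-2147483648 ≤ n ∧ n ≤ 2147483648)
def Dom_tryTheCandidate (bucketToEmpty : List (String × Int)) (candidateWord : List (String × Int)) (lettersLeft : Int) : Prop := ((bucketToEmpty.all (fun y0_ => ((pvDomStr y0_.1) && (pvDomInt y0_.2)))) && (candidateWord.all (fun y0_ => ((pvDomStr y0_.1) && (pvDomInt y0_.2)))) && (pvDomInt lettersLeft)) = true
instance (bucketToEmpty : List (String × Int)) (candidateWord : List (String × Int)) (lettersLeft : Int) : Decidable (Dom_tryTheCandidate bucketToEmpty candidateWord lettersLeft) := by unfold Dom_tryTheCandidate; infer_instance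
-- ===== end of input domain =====

-- B separates the feasibility check (one all-pass) from the subtraction and computes
-- the new letters-left as a closed-form sum, instead of A's single break-out loop
-- with an accumulator; objective: simpler decomposition (same return value).
-- Dict lookups are ported with getD 0; under Pre_ every lookup the loops reach hits
-- an existing key, so this is exact (outside Pre_ the Python raises KeyError).

-- ===== PORT A =====
-- the for-loop of A: walks candidateWord's keys, subtracting in newBucket;
-- returns none when the loop breaks (isGoodWord = False)
def pvGoA (wd : PySem.Dict String Int) :
    List String → PySem.Dict String Int → Int → Option (PySem.Dict String Int × Int)
  | [], nb, t => some (nb, t)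
  | k :: ks, nb, t =>
    if nb.getD k 0 - wd.getD k 0 ≥ 0 then
      pvGoA wd ks (nb.insert k (nb.getD k 0 - wd.getD k 0)) (t - wd.getD k 0)
    else
      none

def tryTheCandidate (bucketToEmpty : List (String × Int)) (candidateWord : List (String × Int)) (lettersLeft : Int) : Bool × (List (String × Int)) × Int :=
  match pvGoA (PySem.Dict.mk candidateWord) (PySem.Dict.keys (PySem.Dict.mk candidateWord)) (PySem.Dict.mk bucketToEmpty) lettersLeft with
  | some (nb, t) => (true, nb.items, t)
  | none => (false, bucketToEmpty, lettersLeft)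

-- ===== PORT B =====
def tryTheCandidate_alt (bucketToEmpty : List (String × Int)) (candidateWord : List (String × Int)) (lettersLeft : Int) : Bool × (List (String × Int)) × Int :=
  if (PySem.Dict.keys (PySem.Dict.mk candidateWord)).all
      (fun k => decide ((PySem.Dict.mk candidateWord).getD k 0 ≤ (PySem.Dict.mk bucketToEmpty).getD k 0)) then
    (true,
     ((PySem.Dict.keys (PySem.Dict.mk candidateWord)).foldl
        (fun nb k => nb.insert k (nb.getD k 0 - (PySem.Dict.mk candidateWord).getD k 0))
        (PySem.Dict.mk bucketToEmpty)).items,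
     lettersLeft - (PySem.Dict.values (PySem.Dict.mk candidateWord)).sum)
  else
    (false, bucketToEmpty, lettersLeft)

-- ===== PRECONDITION & SPEC =====
-- Pre_ excludes (i) association lists whose candidateWord has duplicate keys — those do not
-- encode any Python dict, so A's behaviour on them is not defined by the source — and
-- (ii) the inputs on which A raises KeyError: the first letter of candidateWord that is
-- missing-from-the-bucket-or-insufficient is actually missing from the bucket.
def pvBadLetter (bucketToEmpty : List (String × Int)) (candidateWord : List (String × Int)) : Option String :=
  (candidateWord.map Prod.fst).find?
    (fun k => !((PySem.Dict.mk bucketToEmpty).contains k &&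
                decide ((PySem.Dict.mk candidateWord).getD k 0 ≤ (PySem.Dict.mk bucketToEmpty).getD k 0)))

def Pre_tryTheCandidate (bucketToEmpty : List (String × Int)) (candidateWord : List (String × Int)) (lettersLeft : Int) : Prop :=
  (candidateWord.map Prod.fst).Nodup ∧
  ((pvBadLetter bucketToEmpty candidateWord).all
      (fun k => (PySem.Dict.mk bucketToEmpty).contains k)) = true

instance (bucketToEmpty : List (String × Int)) (candidateWord : List (String × Int)) (lettersLeft : Int) : Decidable (Pre_tryTheCandidate bucketToEmpty candidateWord lettersLeft) := by unfold Pre_tryTheCandidate; infer_instance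

def pvWitness_tryTheCandidate : (List (String × Int)) × (List (String × Int)) × Int :=
  ([("a", 2), ("b", 1)], [("a", 1)], 5)

def Spec_tryTheCandidate (bucketToEmpty : List (String × Int)) (candidateWord : List (String × Int)) (lettersLeft : Int) (out : Bool × (List (String × Int)) × Int) : Prop := out = tryTheCandidate_alt bucketToEmpty candidateWord lettersLeft
instance (bucketToEmpty : List (String × Int)) (candidateWord : List (String × Int)) (lettersLeft : Int) (out : Bool × (List (String × Int)) × Int) : Decidable (Spec_tryTheCandidate bucketToEmpty candidateWord lettersLeft out) := by unfold Spec_tryTheCandidate; infer_instance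

-- ===== CLAIM (what is proved, stated in full; the proofs are below) =====
def Claim_equal_tryTheCandidate : Prop := ∀ (bucketToEmpty : List (String × Int)) (candidateWord : List (String × Int)) (lettersLeft : Int), Dom_tryTheCandidate bucketToEmpty candidateWord lettersLeft → Pre_tryTheCandidate bucketToEmpty candidateWord lettersLeft → Spec_tryTheCandidate bucketToEmpty candidateWord lettersLeft (tryTheCandidate bucketToEmpty candidateWord lettersLeft)

-- ===== LEMMAS AND PROOFS =====

-- A's loop, run over a duplicate-free key list whose lookups in nb agree with bd,
-- computes exactly B's three pieces: the all-check, the foldl bucket, the summed cost.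
theorem pvGoA_eq (wd bd : PySem.Dict String Int) :
    ∀ (ks : List String) (nb : PySem.Dict String Int) (t : Int),
      ks.Nodup → (∀ k ∈ ks, nb.getD k 0 = bd.getD k 0) →
      pvGoA wd ks nb t =
        if ks.all (fun k => decide (wd.getD k 0 ≤ bd.getD k 0)) then
          some (ks.foldl (fun nb k => nb.insert k (nb.getD k 0 - wd.getD k 0)) nb,
                t - (ks.map (fun k => wd.getD k 0)).sum)
        else none := by
  intro ks
  induction ks with
  | nil => intro nb t _ _; simp [pvGoA]
  | cons k ks ih =>
    intro nb t hnd hagree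
    have hk : nb.getD k 0 = bd.getD k 0 := hagree k (by simp)
    have hnotmem : k ∉ ks := (List.nodup_cons.mp hnd).1
    by_cases hle : wd.getD k 0 ≤ bd.getD k 0
    · have hcond : nb.getD k 0 - wd.getD k 0 ≥ 0 := by omega
      have hagree' : ∀ k' ∈ ks,
          (nb.insert k (nb.getD k 0 - wd.getD k 0)).getD k' 0 = bd.getD k' 0 := by
        intro k' hk'
        rw [PySem.Dict.getD_insert]
        have : k' ≠ k := fun h => hnotmem (h ▸ hk')
        simp [this]
        exact hagree k' (by simp [hk'])
      have := ih (nb.insert k (nb.getD k 0 - wd.getD k 0)) (t - wd.getD k 0)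
        (List.nodup_cons.mp hnd).2 hagree'
      simp only [pvGoA, hcond, if_pos, List.all_cons, List.foldl_cons, List.map_cons,
        List.sum_cons, hle, decide_true, Bool.true_and]
      rw [this]
      split_ifs with h
      · congr 1
        congr 1
        omega
      · rfl
    · have hcond : ¬ (nb.getD k 0 - wd.getD k 0 ≥ 0) := by omega
      simp only [pvGoA, List.all_cons]
      rw [if_neg hcond, if_neg (by simp [hle])]

-- ===== VERDICT (by name: the statement is the Claim_ definition above) =====
theorem tryTheCandidate_spec : Claim_equal_tryTheCandidate := by
  intro b w L _ hpre
  unfold Spec_tryTheCandidate tryTheCandidate tryTheCandidate_alt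
  have hnd : (PySem.Dict.keys (PySem.Dict.mk w)).Nodup := by
    simpa [PySem.Dict.keys] using hpre.1
  rw [pvGoA_eq (PySem.Dict.mk w) (PySem.Dict.mk b) (PySem.Dict.keys (PySem.Dict.mk w))
      (PySem.Dict.mk b) L hnd (fun _ _ => rfl)]
  split_ifs with h
  · simp
    have hmap : List.map ((fun k => (PySem.Dict.mk w).getD k 0) ∘ fun x => x.1) w
        = List.map (fun x : String × Int => x.2) w := by
      apply List.map_congr_left
      intro p hp
      exact PySem.Dict.getD_of_mem_items (d := PySem.Dict.mk w) (k := p.1) (v := p.2)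
        (by simpa using hp) hnd 0
    rw [hmap]
  · rfl
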